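-- pv_equiv track=rewrite | github.com/BadInfluence69/AdVault-DNS- | DNS_Ad_Blocker.py.py | domain_in_set_or_parent
-- ===== SOURCE A (Python) =====
-- def _normalize_domain(domain: str) -> str:
--     d = (domain or "").strip().strip(".").lower()
--     try:
--         d = d.encode("idna").decode("ascii")
--     except Exception:
--         pass
--     return d
--
-- def domain_in_set_or_parent(domain: str, s: set) -> bool:
--     d = _normalize_domain(domain)
--     if d in s:
--         return True
--     parts = d.split(".")
--     for i in range(1, len(parts)):
--         if ".".join(parts[i:]) in s:
--             return True
--     return False
-- ===== SOURCE B (Python) =====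
-- def _normalize_domain(domain: str) -> str:
--     d = (domain or "").strip().strip(".").lower()
--     try:
--         d = d.encode("idna").decode("ascii")
--     except Exception:
--         pass
--     return d
--
-- def domain_in_set_or_parent(domain: str, s: set) -> bool:
--     # Instead of enumerating the domain's suffixes and probing the set (A),
--     # scan the set once and test each entry e directly against the domain:
--     # e blocks d exactly when e == d or d ends with "." + e, i.e. when
--     # "." + d ends with "." + e.  One endswith per entry, no split/join.
--     target = "." + _normalize_domain(domain)
--     return any(target.endswith("." + e) for e in s)
-- ===== Notes on version B (the rewrite author's own statement) =====
-- stated objective: alternative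
-- what changed: B inverts the roles of the two inputs: instead of A's enumeration of the domain's dot-suffixes each rebuilt by slice+join and probed against the set, B scans the blocklist once and tests each entry e with a single ('.'+d).endswith('.'+e) check, using the fact that e blocks d exactly when e equals d or is a label-aligned suffix of d.
import Mathlib
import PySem

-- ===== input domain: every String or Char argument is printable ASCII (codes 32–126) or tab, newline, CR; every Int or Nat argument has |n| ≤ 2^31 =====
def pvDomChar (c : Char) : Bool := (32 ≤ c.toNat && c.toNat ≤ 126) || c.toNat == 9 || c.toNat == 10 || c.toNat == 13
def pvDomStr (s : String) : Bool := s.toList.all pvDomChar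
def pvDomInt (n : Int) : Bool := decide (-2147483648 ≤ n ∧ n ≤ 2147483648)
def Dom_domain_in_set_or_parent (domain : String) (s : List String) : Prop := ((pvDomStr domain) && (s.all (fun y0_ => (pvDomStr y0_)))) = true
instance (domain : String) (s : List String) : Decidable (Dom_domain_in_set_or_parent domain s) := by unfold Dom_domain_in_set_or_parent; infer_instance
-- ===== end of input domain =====

-- B scans the blocklist and tests each entry with one endswith check instead of
-- A's suffix enumeration with slice+join and set probes; equal return values proved.

-- ===== PORT A =====
-- _normalize_domain: '(domain or "")' is the identity on str; on the ASCII input domain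
-- d.encode('idna') either returns d unchanged (CPython's pure-ASCII path on an already
-- lowercased string) or raises (caught by the bare except, leaving d unchanged), so the
-- try/except block is the identity and the normalization is exactly strip / strip('.') / lower.
def pvNormalizeDomain (domain : String) : String :=
  PySem.Str.lower (PySem.Str.stripChars (PySem.Str.strip domain) ".")

def domain_in_set_or_parent (domain : String) (s : List String) : Bool :=
  let d := pvNormalizeDomain domain
  if d ∈ s then true
  else
    let parts := (PySem.Str.split? d ".").getD []      -- sep ≠ "", so split? is some
    -- for i in range(1, len(parts)): if ".".join(parts[i:]) in s: return True
    (PySem.List.pyRange 1 parts.length 1).foldl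
      (fun acc i => acc || decide (PySem.Str.join "." (PySem.List.slice parts (some i) none) ∈ s))
      false

-- ===== PORT B =====
def domain_in_set_or_parent_alt (domain : String) (s : List String) : Bool :=
  let target := "." ++ pvNormalizeDomain domain
  -- any(target.endswith("." + e) for e in s): a bool any over the set's elements,
  -- independent of the set's iteration order
  s.any (fun e => PySem.Str.endswith target ("." ++ e))

-- ===== PRECONDITION & SPEC =====
def Spec_domain_in_set_or_parent (domain : String) (s : List String) (out : Bool) : Prop := out = domain_in_set_or_parent_alt domain s
instance (domain : String) (s : List String) (out : Bool) : Decidable (Spec_domain_in_set_or_parent domain s out) := by unfold Spec_domain_in_set_or_parent; infer_instance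

-- ===== CLAIM (what is proved, stated in full; the proofs are below) =====
def Claim_equal_domain_in_set_or_parent : Prop := ∀ (domain : String) (s : List String), Dom_domain_in_set_or_parent domain s → Spec_domain_in_set_or_parent domain s (domain_in_set_or_parent domain s)

-- ===== LEMMAS AND PROOFS =====

-- reference version of Python's str.split('.') at the List Char level
def pvSp : List Char → List (List Char)
  | [] => [[]]
  | c :: rest => if c = '.' then [] :: pvSp rest else (pvSp rest).modifyHead (c :: ·)

theorem pvSp_ne_nil (l : List Char) : pvSp l ≠ [] := by
  induction l with
  | nil => simp [pvSp]
  | cons c rest ih =>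
    simp only [pvSp]
    split_ifs
    · simp
    · cases h : pvSp rest with
      | nil => exact absurd h ih
      | cons y t => simp [List.modifyHead]

theorem pvSp_go (fuel : Nat) (l cur : List Char) (acc : List (List Char))
    (h : l.length ≤ fuel) :
    PySem.Chars.splitOn.go ['.'] fuel l cur acc
      = acc.reverse ++ (pvSp l).modifyHead (cur.reverse ++ ·) := by
  induction fuel generalizing l cur acc with
  | zero =>
    have hl : l = [] := List.length_eq_zero_iff.mp (Nat.le_zero.mp h)
    subst hl
    simp [PySem.Chars.splitOn.go, pvSp, List.modifyHead]
  | succ fuel ih =>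
    cases l with
    | nil => simp [PySem.Chars.splitOn.go, pvSp, List.modifyHead]
    | cons c rest =>
      by_cases hc : c = '.'
      · subst hc
        have hpre : List.isPrefixOf ['.'] ('.' :: rest) = true := by
          simp [List.isPrefixOf]
        rw [PySem.Chars.splitOn.go]
        simp only [hpre, if_true]
        rw [show List.drop (List.length ['.']) ('.' :: rest) = rest by simp]
        rw [ih rest [] (List.reverse cur :: acc) (by simpa using Nat.succ_le_succ_iff.mp h)]
        simp only [pvSp, if_true, List.modifyHead, List.reverse_cons, List.reverse_nil,
          List.nil_append, List.append_assoc, List.singleton_append, List.append_nil]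
        cases pvSp rest <;> simp
      · have hpre : List.isPrefixOf ['.'] (c :: rest) = false := by
          simp [List.isPrefixOf]
          exact fun hh => absurd hh.symm hc
        rw [PySem.Chars.splitOn.go]
        simp only [hpre, if_false, Bool.false_eq_true]
        rw [ih rest (c :: cur) acc (by simpa using Nat.succ_le_succ_iff.mp h)]
        simp only [pvSp, hc, if_false]
        cases hr : pvSp rest with
        | nil => exact absurd hr (pvSp_ne_nil rest)
        | cons y t => simp [List.modifyHead]

theorem pvSplitOn_eq (dl : List Char) : PySem.Chars.splitOn dl ['.'] = pvSp dl := by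
  unfold PySem.Chars.splitOn
  rw [pvSp_go dl.length.succ dl [] [] (Nat.le_succ _)]
  cases hsp : pvSp dl <;> simp [List.modifyHead]

theorem pvJoinCons (x : List Char) (t : List (List Char)) (ht : t ≠ []) :
    PySem.Chars.join ['.'] (x :: t) = x ++ '.' :: PySem.Chars.join ['.'] t := by
  cases t with
  | nil => exact absurd rfl ht
  | cons y t' => simp [PySem.Chars.join_cons_cons]

theorem pvJoinSp (l : List Char) : PySem.Chars.join ['.'] (pvSp l) = l := by
  induction l with
  | nil => simp [pvSp, PySem.Chars.join_singleton]
  | cons c rest ih =>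
    by_cases hc : c = '.'
    · subst hc
      simp only [pvSp, if_true]
      rw [pvJoinCons [] (pvSp rest) (pvSp_ne_nil rest), ih]
      simp
    · simp only [pvSp, hc, if_false]
      cases hr : pvSp rest with
      | nil => exact absurd hr (pvSp_ne_nil rest)
      | cons y t =>
        rw [hr] at ih
        cases t with
        | nil =>
          simp [List.modifyHead, PySem.Chars.join_singleton]
          simpa [PySem.Chars.join_singleton] using ih
        | cons t0 t' =>
          simp only [List.modifyHead]
          rw [pvJoinCons (c :: y) (t0 :: t') (by simp), List.cons_append,
            ← pvJoinCons y (t0 :: t') (by simp), ih]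

theorem pvNoDotSp (l : List Char) : ∀ p ∈ pvSp l, '.' ∉ p := by
  induction l with
  | nil => intro p hp; simp [pvSp] at hp; simp [hp]
  | cons c rest ih =>
    intro p hp
    by_cases hc : c = '.'
    · subst hc
      simp only [pvSp, if_true, List.mem_cons] at hp
      rcases hp with h | h
      · simp [h]
      · exact ih p h
    · simp only [pvSp, hc, if_false] at hp
      cases hr : pvSp rest with
      | nil => exact absurd hr (pvSp_ne_nil rest)
      | cons y t =>
        rw [hr] at hp
        simp only [List.modifyHead, List.mem_cons] at hp
        rcases hp with h | h
        · subst h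
          intro hmem
          rcases List.mem_cons.mp hmem with h' | h'
          · exact hc h'.symm
          · exact ih y (by rw [hr]; exact List.mem_cons_self) h'
        · exact ih p (by rw [hr]; exact List.mem_cons_of_mem _ h)

theorem pvJoinAppend (xs ys : List (List Char)) (hx : xs ≠ []) (hy : ys ≠ []) :
    PySem.Chars.join ['.'] (xs ++ ys)
      = PySem.Chars.join ['.'] xs ++ '.' :: PySem.Chars.join ['.'] ys := by
  induction xs with
  | nil => exact absurd rfl hx
  | cons x xs' ih =>
    cases xs' with
    | nil =>
      rw [List.singleton_append, pvJoinCons x ys hy]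
      simp [PySem.Chars.join_singleton]
    | cons x2 xs'' =>
      rw [List.cons_append, pvJoinCons x ((x2 :: xs'') ++ ys) (by simp),
        ih (by simp) , pvJoinCons x (x2 :: xs'') (by simp)]
      simp

-- a dot inside the join of dot-free parts marks a boundary between parts
theorem pvLemC (P : List (List Char)) (hP : ∀ p ∈ P, '.' ∉ p) :
    ∀ pre el, PySem.Chars.join ['.'] P = pre ++ '.' :: el →
      ∃ i, 1 ≤ i ∧ i < P.length ∧ el = PySem.Chars.join ['.'] (P.drop i) := by
  induction P with
  | nil =>
    intro pre el h
    simp [PySem.Chars.join] at h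
    exact absurd h.symm (List.append_ne_nil_of_right_ne_nil pre (by simp))
  | cons p P' ih =>
    intro pre el h
    cases hP' : P' with
    | nil =>
      subst hP'
      rw [PySem.Chars.join_singleton] at h
      exact absurd (h ▸ List.mem_append_right pre (List.mem_cons_self))
        (hP p List.mem_cons_self)
    | cons q P'' =>
      rw [hP'] at h ih hP
      rw [pvJoinCons p (q :: P'') (by simp)] at h
      rcases List.append_eq_append_iff.mp h with ⟨a', ha1, ha2⟩ | ⟨c', hc1, hc2⟩
      · -- pre = p ++ a',  '.' :: join (q :: P'') = a' ++ '.' :: el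
        cases a' with
        | nil =>
          simp only [List.nil_append] at ha2
          injection ha2 with _ hjoin
          exact ⟨1, le_refl 1, by simp, hjoin.symm⟩
        | cons d a'' =>
          injection ha2 with hd hjoin
          subst hd
          rcases ih (fun r hr => hP r (List.mem_cons_of_mem p hr)) a'' el hjoin with
            ⟨i, hi1, hi2, hi3⟩
          exact ⟨i + 1, by omega, by simpa using Nat.succ_lt_succ hi2, by simpa using hi3⟩
      · -- p = pre ++ c',  '.' :: el = c' ++ '.' :: join (q :: P'')
        cases c' with
        | nil =>
          simp only [List.nil_append] at hc2
          injection hc2 with _ hjoin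
          exact ⟨1, le_refl 1, by simp, hjoin⟩
        | cons d c'' =>
          injection hc2 with hd _
          subst hd
          exact absurd (hc1 ▸ List.mem_append_right pre List.mem_cons_self)
            (hP p List.mem_cons_self)

-- key characterization: the label-aligned suffixes of dl are exactly the joins of drops
theorem pvSuffixIff (dl el : List Char) :
    ('.' :: el) <:+ ('.' :: dl)
      ↔ ∃ i, i < (pvSp dl).length ∧ el = PySem.Chars.join ['.'] ((pvSp dl).drop i) := by
  constructor
  · intro h
    rcases List.suffix_cons_iff.mp h with h | h
    · have hel : el = dl := by injection h
      refine ⟨0, ?_, ?_⟩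
      · have := pvSp_ne_nil dl
        cases hsp : pvSp dl with
        | nil => exact absurd hsp this
        | cons _ _ => simp
      · rw [List.drop_zero, pvJoinSp]; exact hel
    · rcases h with ⟨pre, hpre⟩
      have : PySem.Chars.join ['.'] (pvSp dl) = pre ++ '.' :: el := by
        rw [pvJoinSp]; exact hpre.symm
      rcases pvLemC (pvSp dl) (pvNoDotSp dl) pre el this with ⟨i, _, hi2, hi3⟩
      exact ⟨i, hi2, hi3⟩
  · rintro ⟨i, hi, hel⟩
    cases i with
    | zero =>
      rw [List.drop_zero, pvJoinSp] at hel
      subst hel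
      exact List.suffix_refl _
    | succ i' =>
      have htake : (pvSp dl).take (i' + 1) ≠ [] := by
        have := pvSp_ne_nil dl
        simp [List.take_eq_nil_iff]
        intro h; exact absurd h this
      have hdrop : (pvSp dl).drop (i' + 1) ≠ [] := by
        simp [List.drop_eq_nil_iff]
        omega
      have hsplit : dl = PySem.Chars.join ['.'] ((pvSp dl).take (i' + 1)) ++
          '.' :: PySem.Chars.join ['.'] ((pvSp dl).drop (i' + 1)) := by
        conv_lhs => rw [← pvJoinSp dl]
        rw [← pvJoinAppend _ _ htake hdrop, List.take_append_drop]
      refine ⟨'.' :: PySem.Chars.join ['.'] ((pvSp dl).take (i' + 1)), ?_⟩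
      rw [hel]
      conv_rhs => rw [hsplit]
      simp

-- the per-element bridge, at the String level
theorem pvElemIff (d e : String) :
    PySem.Str.endswith ("." ++ d) ("." ++ e) = true
      ↔ (e = d ∨ ∃ i : ℕ, 1 ≤ i ∧ i < ((PySem.Str.split? d ".").getD []).length ∧
            e = PySem.Str.join "." (((PySem.Str.split? d ".").getD []).drop i)) := by
  have hdot : ("." : String).toList = ['.'] := rfl
  have hparts : (PySem.Str.split? d ".").getD []
      = (pvSp d.toList).map String.ofList := by
    unfold PySem.Str.split? PySem.Chars.split?
    rw [hdot]
    simp [pvSplitOn_eq]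
  have hsw : PySem.Str.endswith ("." ++ d) ("." ++ e) = true
      ↔ ('.' :: e.toList) <:+ ('.' :: d.toList) := by
    unfold PySem.Str.endswith
    rw [PySem.Chars.endswith_iff]
    simp [hdot]
  rw [hsw, pvSuffixIff]
  have hjoin : ∀ i : ℕ,
      (e = PySem.Str.join "." (((pvSp d.toList).map String.ofList).drop i)
        ↔ e.toList = PySem.Chars.join ['.'] ((pvSp d.toList).drop i)) := by
    intro i
    rw [← String.toList_inj]
    constructor <;> intro h <;> rw [h] <;>
      simp [PySem.Str.toList_join, hdot, ← List.map_drop, List.map_map,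
        Function.comp_def, String.toList_ofList]
  constructor
  · rintro ⟨i, hi, hel⟩
    cases i with
    | zero =>
      left
      rw [List.drop_zero, pvJoinSp] at hel
      exact String.toList_inj.mp hel
    | succ i' =>
      right
      refine ⟨i' + 1, by omega, ?_, ?_⟩
      · rw [hparts]; simpa using hi
      · rw [hparts, hjoin]; exact hel
  · rintro (h | ⟨i, hi1, hi2, hi3⟩)
    · subst h
      refine ⟨0, ?_, by rw [List.drop_zero, pvJoinSp]⟩
      cases hsp : pvSp e.toList with
      | nil => exact absurd hsp (pvSp_ne_nil _)
      | cons _ _ => simp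
    · refine ⟨i, ?_, ?_⟩
      · rw [hparts] at hi2; simpa using hi2
      · rw [hparts, hjoin] at hi3; exact hi3

theorem pvFoldlOrEqAny {α : Type} (p : α → Bool) (l : List α) (b : Bool) :
    l.foldl (fun acc x => acc || p x) b = (b || l.any p) := by
  induction l generalizing b with
  | nil => simp
  | cons x xs ih => simp [List.foldl_cons, ih, Bool.or_assoc]

-- ===== VERDICT (by name: the statement is the Claim_ definition above) =====
theorem domain_in_set_or_parent_spec : Claim_equal_domain_in_set_or_parent := by
  intro domain s _
  simp only [Spec_domain_in_set_or_parent, domain_in_set_or_parent,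
    domain_in_set_or_parent_alt]
  generalize pvNormalizeDomain domain = d
  have hlen : ((PySem.Str.split? d ".").getD []).length ≥ 1 := by
    have h1 : (PySem.Str.split? d ".").getD [] = (pvSp d.toList).map String.ofList := by
      unfold PySem.Str.split? PySem.Chars.split?
      rw [show ("." : String).toList = ['.'] from rfl]
      simp [pvSplitOn_eq]
    rw [h1, List.length_map]
    cases hsp : pvSp d.toList with
    | nil => exact absurd hsp (pvSp_ne_nil _)
    | cons _ _ => simp
  have helem : ∀ e, PySem.Str.endswith ("." ++ d) ("." ++ e) = true
      ↔ (e = d ∨ ∃ i : ℕ, 1 ≤ i ∧ i < ((PySem.Str.split? d ".").getD []).length ∧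
            e = PySem.Str.join "." (((PySem.Str.split? d ".").getD []).drop i)) :=
    fun e => pvElemIff d e
  generalize hq : (PySem.Str.split? d ".").getD [] = parts at hlen helem ⊢
  clear hq
  rw [pvFoldlOrEqAny, Bool.false_or]
  have hslice : ∀ k : ℕ,
      PySem.List.slice parts (some (1 + (k : ℤ))) none = parts.drop (1 + k) := by
    intro k
    have : (1 : ℤ) + (k : ℤ) = ((1 + k : ℕ) : ℤ) := by push_cast; ring
    rw [this, PySem.List.slice_from_natCast]
  rw [PySem.List.pyRange_one, List.any_map]
  have hn : ((parts.length : ℤ) - 1).toNat = parts.length - 1 := by omega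
  rw [hn]
  by_cases hmem : d ∈ s
  · rw [if_pos hmem]
    symm
    rw [List.any_eq_true]
    exact ⟨d, hmem, (helem d).mpr (Or.inl rfl)⟩
  · rw [if_neg hmem]
    rw [Bool.eq_iff_iff, List.any_eq_true, List.any_eq_true]
    constructor
    · rintro ⟨k, hk, hp⟩
      rw [List.mem_range] at hk
      simp only [Function.comp_apply] at hp
      rw [hslice k, decide_eq_true_iff] at hp
      exact ⟨PySem.Str.join "." (parts.drop (1 + k)), hp,
        (helem _).mpr (Or.inr ⟨1 + k, by omega, by omega, rfl⟩)⟩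
    · rintro ⟨e, hes, he⟩
      rcases (helem e).mp he with h | ⟨i, hi1, hi2, hi3⟩
      · exact absurd (h ▸ hes) hmem
      · refine ⟨i - 1, List.mem_range.mpr (by omega), ?_⟩
        simp only [Function.comp_apply]
        rw [hslice (i - 1), show 1 + (i - 1) = i by omega, decide_eq_true_iff]
        rw [← hi3]
        exact hes
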